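-- pv_equiv track=rewrite | github.com/Jasmineprogrammiert/DSA | C27_Two_Pointers/P27.2.py | smaller_prefixes
-- ===== SOURCE A (Python) =====
-- def smaller_prefixes(arr):
--     max_k = len(arr) // 2
--
--     for k in range (1, max_k + 1):
--         sum_k = sum(arr[0:k])
--         sum_2k = sum(arr[0:2*k])
--
--         if sum_k > sum_2k:
--             return False
--
--     return True
-- ===== SOURCE B (Python) =====
-- def smaller_prefixes(arr):
--     slow = 0
--     fast = 0
--     for k in range(1, len(arr) // 2 + 1):
--         slow += arr[k - 1]
--         fast += arr[2 * k - 2] + arr[2 * k - 1]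
--         if slow > fast:
--             return False
--     return True
-- ===== Notes on version B (the rewrite author's own statement) =====
-- stated objective: alternative
-- what changed: B keeps two running prefix sums (slow at k, fast at 2k) updated in O(1) per step instead of re-summing both prefixes with slices on every iteration.
import Mathlib
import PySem

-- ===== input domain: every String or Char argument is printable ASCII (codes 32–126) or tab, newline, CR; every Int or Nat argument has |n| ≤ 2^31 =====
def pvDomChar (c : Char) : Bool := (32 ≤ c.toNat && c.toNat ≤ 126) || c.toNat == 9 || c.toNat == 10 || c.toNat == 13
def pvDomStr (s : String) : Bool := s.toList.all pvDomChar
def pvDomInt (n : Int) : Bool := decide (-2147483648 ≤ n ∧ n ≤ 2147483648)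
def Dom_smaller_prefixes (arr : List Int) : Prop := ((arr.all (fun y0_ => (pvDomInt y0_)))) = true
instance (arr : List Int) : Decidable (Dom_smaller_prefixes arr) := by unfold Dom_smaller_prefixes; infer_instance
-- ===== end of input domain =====

-- B replaces A's per-iteration slice re-summation by two running prefix sums carried through the loop (objective: alternative).

-- ===== PORT A =====
-- the 'for k in range(1, max_k+1)' loop with its early 'return False'
def pvLoopA (arr : List Int) : List Int → Bool
  | [] => true
  | k :: ks =>
    let sum_k := (PySem.List.slice arr (some 0) (some k)).sum
    let sum_2k := (PySem.List.slice arr (some 0) (some (2 * k))).sum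
    if sum_k > sum_2k then false else pvLoopA arr ks

def smaller_prefixes (arr : List Int) : Bool :=
  let max_k := PySem.Int.floordiv (arr.length : Int) 2
  pvLoopA arr (PySem.List.pyRange 1 (max_k + 1) 1)

-- ===== PORT B =====
-- the same range loop carrying the two running sums; pyGetD is exact here since every index is in range
def pvLoopB (arr : List Int) : List Int → Int → Int → Bool
  | [], _, _ => true
  | k :: ks, slow, fast =>
    let slow' := slow + PySem.List.pyGetD arr (k - 1) 0
    let fast' := fast + PySem.List.pyGetD arr (2 * k - 2) 0 + PySem.List.pyGetD arr (2 * k - 1) 0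
    if slow' > fast' then false else pvLoopB arr ks slow' fast'

def smaller_prefixes_alt (arr : List Int) : Bool :=
  pvLoopB arr (PySem.List.pyRange 1 (PySem.Int.floordiv (arr.length : Int) 2 + 1) 1) 0 0

-- ===== PRECONDITION & SPEC =====
def Spec_smaller_prefixes (arr : List Int) (out : Bool) : Prop := out = smaller_prefixes_alt arr
instance (arr : List Int) (out : Bool) : Decidable (Spec_smaller_prefixes arr out) := by unfold Spec_smaller_prefixes; infer_instance

-- ===== CLAIM (what is proved, stated in full; the proofs are below) =====
def Claim_equal_smaller_prefixes : Prop := ∀ (arr : List Int), Dom_smaller_prefixes arr → Spec_smaller_prefixes arr (smaller_prefixes arr)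

-- ===== LEMMAS AND PROOFS =====

theorem pv_sum_take_succ (arr : List Int) (j : Nat) (hj : j < arr.length) :
    (arr.take (j + 1)).sum = (arr.take j).sum + arr.getD j 0 := by
  rw [List.getD_eq_getElem arr 0 hj, List.sum_take_succ arr j hj]

theorem pv_main (arr : List Int) (m : Nat) (hm : 2 * m ≤ arr.length) :
    ∀ (j : Nat), j ≤ m →
      pvLoopA arr (PySem.List.pyRange ((j : Int) + 1) ((m : Int) + 1) 1) =
      pvLoopB arr (PySem.List.pyRange ((j : Int) + 1) ((m : Int) + 1) 1)
        ((arr.take j).sum) ((arr.take (2 * j)).sum) := by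
  intro j
  induction hfuel : m - j generalizing j with
  | zero =>
    intro hj
    have hjm : j = m := by omega
    subst hjm
    rw [PySem.List.pyRange_one_eq_nil (by omega)]
    rfl
  | succ n ih =>
    intro hj
    have hjm : j < m := by omega
    have hlen1 : j < arr.length := by omega
    have hlen2 : 2 * j < arr.length := by omega
    have hlen3 : 2 * j + 1 < arr.length := by omega
    rw [PySem.List.pyRange_one_cons (by omega)]
    simp only [pvLoopA, pvLoopB]
    have hc1 : ((j : Int) + 1) = ((j + 1 : Nat) : Int) := by push_cast; ring
    have hc2 : (2 * ((j : Int) + 1)) = ((2 * j + 2 : Nat) : Int) := by push_cast; ring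
    have hs1 : PySem.List.slice arr (some 0) (some ((j : Int) + 1)) = arr.take (j + 1) := by
      rw [hc1, PySem.List.slice_zero_start, PySem.List.slice_to_natCast]
    have hs2 : PySem.List.slice arr (some 0) (some (2 * ((j : Int) + 1))) = arr.take (2 * j + 2) := by
      rw [hc2, PySem.List.slice_zero_start, PySem.List.slice_to_natCast]
    have hg1 : PySem.List.pyGetD arr ((j : Int) + 1 - 1) 0 = arr.getD j 0 := by
      rw [show ((j : Int) + 1 - 1) = ((j : Nat) : Int) by ring, PySem.List.pyGetD_natCast]
    have hg2 : PySem.List.pyGetD arr (2 * ((j : Int) + 1) - 2) 0 = arr.getD (2 * j) 0 := by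
      rw [show (2 * ((j : Int) + 1) - 2) = ((2 * j : Nat) : Int) by push_cast; ring, PySem.List.pyGetD_natCast]
    have hg3 : PySem.List.pyGetD arr (2 * ((j : Int) + 1) - 1) 0 = arr.getD (2 * j + 1) 0 := by
      rw [show (2 * ((j : Int) + 1) - 1) = ((2 * j + 1 : Nat) : Int) by push_cast; ring, PySem.List.pyGetD_natCast]
    have hsum1 : (arr.take (j + 1)).sum = (arr.take j).sum + arr.getD j 0 :=
      pv_sum_take_succ arr j hlen1
    have h2a : (arr.take (2 * j + 1)).sum = (arr.take (2 * j)).sum + arr.getD (2 * j) 0 :=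
      pv_sum_take_succ arr (2 * j) hlen2
    have h2b : (arr.take (2 * j + 2)).sum = (arr.take (2 * j + 1)).sum + arr.getD (2 * j + 1) 0 :=
      pv_sum_take_succ arr (2 * j + 1) hlen3
    have hsum2 : (arr.take (2 * j + 2)).sum
        = (arr.take (2 * j)).sum + arr.getD (2 * j) 0 + arr.getD (2 * j + 1) 0 := by
      rw [h2b, h2a]
    rw [hs1, hs2, hg1, hg2, hg3, hsum1, hsum2]
    by_cases hcmp : (arr.take j).sum + arr.getD j 0
        > (arr.take (2 * j)).sum + arr.getD (2 * j) 0 + arr.getD (2 * j + 1) 0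
    · rw [if_pos hcmp, if_pos hcmp]
    · rw [if_neg hcmp, if_neg hcmp]
      rw [show ((j : Int) + 1 + 1) = (((j + 1 : Nat) : Int) + 1) by push_cast; ring]
      rw [← hsum1, ← hsum2]
      have := ih (j + 1) (by omega) (by omega)
      rw [show 2 * (j + 1) = 2 * j + 2 by ring] at this
      exact this

-- ===== VERDICT (by name: the statement is the Claim_ definition above) =====
theorem smaller_prefixes_spec : Claim_equal_smaller_prefixes := by
  intro arr _
  unfold Spec_smaller_prefixes smaller_prefixes smaller_prefixes_alt
  have h := pv_main arr (arr.length / 2) (by omega) 0 (by omega)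
  simpa [PySem.Int.floordiv_natCast] using h
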